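-- pv_equiv track=rewrite | github.com/StephenETaylor/2021 | DSC/readResults.py | split_sv_line
-- ===== SOURCE A (Python) =====
-- def split_sv_line(lin, delimiter='\t', text_wrap='"'):
--     """
--         split a delimiter-separated-values line, which may have some fields
--         enclosed in the text_wrap character, if they happen to include the
--         delimiter character as data.
--         I use an FSA instead of simple split, because split can't deal with
--         commas/tabs nested inside quotes
--     """
--     if delimiter == text_wrap:
--         raise Exception('delimiter == textwrap')
--
--     while lin[-1] == '\n' or lin[-1] == '\r':
--         lin = lin[:-1]  # clear line termination chars for linux, msdos, macos
--
--     state = 0 #beginning of field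
--     field = None
--     line = []
--     for ch in lin:
--         if state == 0: # beginning of field
--             if ch == delimiter:
--                 line.append(None)
--             elif ch == text_wrap:
--                 field = ''
--                 state = 1
--             else:
--                 field = ch
--                 state = 3
--
--         elif state == 1: #wrapping text
--             if ch == text_wrap:
--                 line.append(field)
--                 state = 2
--             else:
--                 field += ch
--
--         elif state == 2: #finished wrapping text, insist on delimiter
--             if ch == delimiter:
--                 state = 0
--             else:
--                 raise Exception('non-empty text after matched text_wrap')
--
--         elif state == 3: #building unwrapped field
--             if ch == delimiter:
--                 line.append(field)
--                 state = 0
--             else: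
--                 field += ch
--
--         else: raise Exception('bug')
--     # finished with chars in line
--     if state == 0: # beginning of field
--         return line
--     elif state == 1: #wrapping text
--         raise Exception('unmatched text-wrapping character')
--     elif state == 2: #finished wrapping text, insist on delimiter
--         line.append(field)
--         # harmless to leave field set for possible debugging
--         return line
--     elif state == 3: #building unwrapped field
--         line.append(field)
--         return line
-- ===== SOURCE B (Python) =====
-- def split_sv_line(lin, delimiter='\t', text_wrap='"'):
--     """Index-based field-by-field tokenizer (vs A's integer-state FSA).
--     Intended fix: a line ending right after a closing text_wrap yields the
--     quoted field ONCE (A appends it twice)."""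
--     if delimiter == text_wrap:
--         raise Exception('delimiter == textwrap')
--     while lin[-1] == '\n' or lin[-1] == '\r':
--         lin = lin[:-1]
--     out = []
--     i = 0
--     n = len(lin)
--     while i < n:
--         if lin[i] == delimiter:
--             out.append(None)          # empty unquoted field
--             i += 1
--         elif lin[i] == text_wrap:
--             j = i + 1
--             while j < n and lin[j] != text_wrap:
--                 j += 1
--             if j == n:
--                 raise Exception('unmatched text-wrapping character')
--             out.append(lin[i + 1:j])  # quoted field (may be '')
--             i = j + 1
--             if i < n:
--                 if lin[i] != delimiter:
--                     raise Exception('non-empty text after matched text_wrap')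
--                 i += 1
--         else:
--             j = i
--             while j < n and lin[j] != delimiter:
--                 j += 1
--             out.append(lin[i:j])      # unquoted field
--             i = j if j == n else j + 1
--     return out
-- ===== Notes on version B (the rewrite author's own statement) =====
-- stated objective: alternative
-- what changed: Replaced A's flat integer-state FSA (one state variable updated per char, appends into a growing list) by an index-free field-by-field tokenizer: at each field boundary it inspects the first char and consumes a whole field at once (quoted span or run-until-delimiter), building the result front-to-back; it also fixes A's double append of a quoted field that ends the line.
-- intended difference: On lines whose stripped content ends exactly at the closing text_wrap of a well-formed quoted field, A appends that field twice (once at the closing quote, once again in its end-of-line state-2 branch), e.g. A('"a"') = ['a','a'], while B returns it once (['a']), which is the intended parse of a quoted last field. — e.g. on split_sv_line("\"a\"", "\t", "\""): A returns [some "a", some "a"], B returns [some "a"]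
-- outside the precondition, e.g. on split_sv_line('\n', '\t', '"'): A raises IndexError, B raises IndexError; on split_sv_line('\r', '\t', '"'): A raises IndexError, B raises IndexError
import Mathlib
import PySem

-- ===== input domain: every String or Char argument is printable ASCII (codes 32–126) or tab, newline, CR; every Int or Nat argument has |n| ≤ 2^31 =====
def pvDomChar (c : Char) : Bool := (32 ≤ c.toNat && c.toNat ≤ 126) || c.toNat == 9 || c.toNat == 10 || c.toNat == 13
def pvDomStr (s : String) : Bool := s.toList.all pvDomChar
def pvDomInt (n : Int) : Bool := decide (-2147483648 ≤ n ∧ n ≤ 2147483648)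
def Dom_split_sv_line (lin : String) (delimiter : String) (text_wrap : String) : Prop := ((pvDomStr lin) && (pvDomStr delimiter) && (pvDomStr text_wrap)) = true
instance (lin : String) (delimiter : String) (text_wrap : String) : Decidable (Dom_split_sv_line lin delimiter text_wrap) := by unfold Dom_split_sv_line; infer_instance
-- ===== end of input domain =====

-- B re-implements A's flat integer-state FSA as a field-by-field tokenizer and returns a
-- quoted field that ends the line ONCE where A appends it twice (intended difference D_).

-- Python compares the 1-char string ch with the (arbitrary) strings delimiter/text_wrap.
def chS (c : Char) : String := String.mk [c]

-- the common leading loop `while lin[-1] in '\n\r': lin = lin[:-1]` of both Pythons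
-- (its IndexError on a string of only '\n'/'\r' chars — incl. empty — is excluded by Pre_)
def stripEolRev : List Char → List Char
  | [] => []
  | c :: r => if c = '\n' ∨ c = '\r' then stripEolRev r else c :: r

def stripEol (l : List Char) : List Char := (stripEolRev l.reverse).reverse

-- ===== PORT A =====
-- the `for ch in lin` FSA loop; state : Int, field : Option str, line : accumulator;
-- `none` result = one of A's `raise` branches (excluded by Pre_)
def fsa (d w : String) : List Char → Int → Option (List Char) → List (Option String) →
    Option (Int × Option (List Char) × List (Option String))
  | [], st, f, line => some (st, f, line)
  | ch :: rest, st, f, line =>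
    if st = 0 then
      if chS ch = d then fsa d w rest 0 f (line ++ [none])
      else if chS ch = w then fsa d w rest 1 (some []) line
      else fsa d w rest 3 (some [ch]) line
    else if st = 1 then
      if chS ch = w then fsa d w rest 2 f (line ++ [some (String.mk (f.getD []))])
      else fsa d w rest 1 (some ((f.getD []) ++ [ch])) line
    else if st = 2 then
      if chS ch = d then fsa d w rest 0 f line
      else none                                   -- raise: non-empty text after matched text_wrap
    else if st = 3 then
      if chS ch = d then fsa d w rest 0 f (line ++ [some (String.mk (f.getD []))])
      else fsa d w rest 3 (some ((f.getD []) ++ [ch])) line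
    else none                                     -- raise: bug

def split_sv_line (lin : String) (delimiter : String) (text_wrap : String) : List (Option String) :=
  if delimiter = text_wrap then []                -- Python: raise 'delimiter == textwrap' (outside Pre_)
  else
    match fsa delimiter text_wrap (stripEol lin.toList) 0 none [] with
    | some (st, f, line) =>
      if st = 0 then line
      else if st = 1 then []                      -- raise: unmatched text-wrapping character (outside Pre_)
      else if st = 2 then line ++ [some (String.mk (f.getD []))]
      else if st = 3 then line ++ [some (String.mk (f.getD []))]
      else []
    | none => []                                  -- a raise inside the loop (outside Pre_)

-- ===== PORT B =====
-- B's inner quoted-field loop: chars up to the matching text_wrap, none = unmatched (raise)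
def spanQuote (w : String) : List Char → Option (List Char × List Char)
  | [] => none
  | c :: r => if chS c = w then some ([], r) else (spanQuote w r).map (fun p => (c :: p.1, p.2))

-- B's inner unquoted-field loop: chars up to the next delimiter (which stays in .2)
def spanField (d : String) : List Char → List Char × List Char
  | [] => ([], [])
  | c :: r => if chS c = d then ([], c :: r) else
      ((c :: (spanField d r).1), (spanField d r).2)

-- B's outer cursor loop, recursing on the rest of the line after each complete field
-- (fuel = a bound on the length, only to make the recursion structural; each field
-- consumes at least one char, so fuel := length is always enough);
-- builds the result front-to-back; none = one of B's raises (outside Pre_)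
def altFieldsF (d w : String) : Nat → List Char → Option (List (Option String))
  | _, [] => some []
  | 0, _ :: _ => none                             -- out of fuel: unreachable from altFields
  | n + 1, c :: rest =>
    if chS c = d then (altFieldsF d w n rest).map (fun bl => none :: bl)
    else if chS c = w then
      match spanQuote w rest with
      | none => none                              -- raise: unmatched text-wrapping character
      | some (s, r') =>
        match r' with
        | [] => some [some (String.mk s)]
        | c2 :: r'' =>
          if chS c2 = d then (altFieldsF d w n r'').map (fun bl => some (String.mk s) :: bl)
          else none                               -- raise: non-empty text after matched text_wrap
    else
      match spanField d rest with
      | (s, []) => some [some (String.mk (c :: s))]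
      | (s, _ :: r'') => (altFieldsF d w n r'').map (fun bl => some (String.mk (c :: s)) :: bl)

def altFields (d w : String) (l : List Char) : Option (List (Option String)) :=
  altFieldsF d w l.length l

def split_sv_line_alt (lin : String) (delimiter : String) (text_wrap : String) : List (Option String) :=
  if delimiter = text_wrap then []                -- Python: raise 'delimiter == textwrap' (outside Pre_)
  else
    match altFields delimiter text_wrap (stripEol lin.toList) with
    | some line => line
    | none => []                                  -- a raise (outside Pre_)

-- ===== PRECONDITION & SPEC =====
-- grammar of lines A parses without raising, as boolean grammar clauses over the char list
-- (field-boundary / quoted / after-quote / unquoted positions); a recursive clause set is the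
-- only closed form for balanced-quote well-formedness
mutual
def validF (d w : String) : List Char → Bool
  | [] => true
  | c :: r => (chS c == d && validF d w r) ||
              (chS c != d && chS c == w && validQ d w r) ||
              (chS c != d && chS c != w && validU d w r)
def validQ (d w : String) : List Char → Bool
  | [] => false
  | c :: r => (chS c == w && validEnd d w r) || (chS c != w && validQ d w r)
def validEnd (d w : String) : List Char → Bool
  | [] => true
  | c :: r => chS c == d && validF d w r
def validU (d w : String) : List Char → Bool
  | [] => true
  | c :: r => (chS c == d && validF d w r) || (chS c != d && validU d w r)
end

-- the line content after removing trailing '\n'/'\r' chars, in closed form (library dropWhile)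
def pvContent (lin : String) : List Char :=
  (lin.toList.reverse.dropWhile (fun c => c == '\n' || c == '\r')).reverse

-- Pre_ excludes exactly A's raises: delimiter == text_wrap, a line of only '\n'/'\r' chars
-- (IndexError at lin[-1]), and lines the quote grammar rejects (A's two in-loop raises).
def Pre_split_sv_line (lin : String) (delimiter : String) (text_wrap : String) : Prop :=
  delimiter ≠ text_wrap ∧ pvContent lin ≠ [] ∧ validF delimiter text_wrap (pvContent lin) = true
instance (lin : String) (delimiter : String) (text_wrap : String) : Decidable (Pre_split_sv_line lin delimiter text_wrap) := by unfold Pre_split_sv_line; infer_instance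

def pvWitness_split_sv_line : String × String × String := ("a\tb", "\t", "\"")

-- shape of the input line: does its field structure end exactly at a closing text_wrap?
-- (mode: 0 field boundary, 1 inside quotes, 2 just after a closing quote, 3 inside an
--  unquoted field, 4 dead; true iff the scan of the line ends in mode 2)
def lastQuoted (d w : String) : List Char → Nat → Bool
  | [], m => m == 2
  | c :: r, m =>
    lastQuoted d w r
      (if m = 1 then (if chS c = w then 2 else 1)
       else if m = 2 then (if chS c = d then 0 else 4)
       else if m = 4 then 4
       else if chS c = d then 0
       else if m = 0 ∧ chS c = w then 1
       else 3)

-- On lines whose stripped content ends right after the closing text_wrap of a well-formed quoted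
-- field, A returns that quoted field TWICE (its end-of-loop state-2 branch re-appends the already
-- appended field), while B returns it once — the intended parse of a quoted last field.
def D_split_sv_line (lin : String) (delimiter : String) (text_wrap : String) : Prop :=
  lastQuoted delimiter text_wrap (pvContent lin) 0 = true
instance (lin : String) (delimiter : String) (text_wrap : String) : Decidable (D_split_sv_line lin delimiter text_wrap) := by unfold D_split_sv_line; infer_instance

def Spec_split_sv_line (lin : String) (delimiter : String) (text_wrap : String) (out : List (Option String)) : Prop := ¬ D_split_sv_line lin delimiter text_wrap → out = split_sv_line_alt lin delimiter text_wrap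
instance (lin : String) (delimiter : String) (text_wrap : String) (out : List (Option String)) : Decidable (Spec_split_sv_line lin delimiter text_wrap out) := by unfold Spec_split_sv_line; infer_instance

def pvDiffWitness_split_sv_line : String × String × String := ("\"a\"", "\t", "\"")
def pvDiffWitnessOut_split_sv_line : (List (Option String)) × (List (Option String)) := ([some "a", some "a"], [some "a"])

-- ===== CLAIM =====
def Claim_unchanged_split_sv_line : Prop := ∀ (lin : String) (delimiter : String) (text_wrap : String), Dom_split_sv_line lin delimiter text_wrap → Pre_split_sv_line lin delimiter text_wrap → Spec_split_sv_line lin delimiter text_wrap (split_sv_line lin delimiter text_wrap)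
def Claim_changed_split_sv_line : Prop := Dom_split_sv_line (pvDiffWitness_split_sv_line.1) (pvDiffWitness_split_sv_line.2.1) (pvDiffWitness_split_sv_line.2.2) ∧ Pre_split_sv_line (pvDiffWitness_split_sv_line.1) (pvDiffWitness_split_sv_line.2.1) (pvDiffWitness_split_sv_line.2.2) ∧ D_split_sv_line (pvDiffWitness_split_sv_line.1) (pvDiffWitness_split_sv_line.2.1) (pvDiffWitness_split_sv_line.2.2) ∧ split_sv_line (pvDiffWitness_split_sv_line.1) (pvDiffWitness_split_sv_line.2.1) (pvDiffWitness_split_sv_line.2.2) = pvDiffWitnessOut_split_sv_line.1 ∧ split_sv_line_alt (pvDiffWitness_split_sv_line.1) (pvDiffWitness_split_sv_line.2.1) (pvDiffWitness_split_sv_line.2.2) = pvDiffWitnessOut_split_sv_line.2 ∧ pvDiffWitnessOut_split_sv_line.1 ≠ pvDiffWitnessOut_split_sv_line.2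
def Claim_exact_split_sv_line : Prop := ∀ (lin : String) (delimiter : String) (text_wrap : String), Dom_split_sv_line lin delimiter text_wrap → Pre_split_sv_line lin delimiter text_wrap → D_split_sv_line lin delimiter text_wrap → split_sv_line lin delimiter text_wrap ≠ split_sv_line_alt lin delimiter text_wrap

-- ===== LEMMAS AND PROOFS =====

theorem stripEolRev_eq_dropWhile : ∀ (l : List Char), stripEolRev l = l.dropWhile (fun c => c == '\n' || c == '\r') := by
  intro l
  induction l with
  | nil => rfl
  | cons c r ih =>
    by_cases hc : c = '\n' ∨ c = '\r'
    · have hb : (c == '\n' || c == '\r') = true := by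
        rcases hc with rfl | rfl <;> simp
      rw [stripEolRev, if_pos hc, List.dropWhile_cons, if_pos hb, ih]
    · have hb : ¬ ((c == '\n' || c == '\r') = true) := by
        simp only [Bool.or_eq_true, beq_iff_eq]
        exact hc
      rw [stripEolRev, if_neg hc, List.dropWhile_cons, if_neg hb]

theorem stripEol_eq_pvContent (lin : String) : stripEol lin.toList = pvContent lin := by
  unfold stripEol pvContent
  rw [stripEolRev_eq_dropWhile]

-- the grammar clauses in if-then-else form, for the proofs below
theorem validF_cons (d w : String) (c : Char) (r : List Char) :
    validF d w (c :: r) = (if chS c = d then validF d w r else if chS c = w then validQ d w r else validU d w r) := by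
  rw [validF]
  by_cases h1 : chS c = d
  · have e1 : (chS c == d) = true := by simp [h1]
    have e1' : (chS c != d) = false := by simp [h1]
    rw [e1, e1', if_pos h1]; simp
  · have e1 : (chS c == d) = false := by simp [h1]
    have e1' : (chS c != d) = true := by simp [h1]
    rw [e1, e1', if_neg h1]
    by_cases h2 : chS c = w
    · have e2 : (chS c == w) = true := by simp [h2]
      have e2' : (chS c != w) = false := by simp [h2]
      rw [e2, e2', if_pos h2]; simp
    · have e2 : (chS c == w) = false := by simp [h2]
      have e2' : (chS c != w) = true := by simp [h2]
      rw [e2, e2', if_neg h2]; simp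

theorem validQ_cons (d w : String) (c : Char) (r : List Char) :
    validQ d w (c :: r) = (if chS c = w then validEnd d w r else validQ d w r) := by
  rw [validQ]
  by_cases h1 : chS c = w
  · have e1 : (chS c == w) = true := by simp [h1]
    have e1' : (chS c != w) = false := by simp [h1]
    rw [e1, e1', if_pos h1]; simp
  · have e1 : (chS c == w) = false := by simp [h1]
    have e1' : (chS c != w) = true := by simp [h1]
    rw [e1, e1', if_neg h1]; simp

theorem validEnd_cons (d w : String) (c : Char) (r : List Char) :
    validEnd d w (c :: r) = (if chS c = d then validF d w r else false) := by
  rw [validEnd]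
  by_cases h1 : chS c = d
  · have e1 : (chS c == d) = true := by simp [h1]
    rw [e1, if_pos h1]; simp
  · have e1 : (chS c == d) = false := by simp [h1]
    rw [e1, if_neg h1]; simp

theorem validU_cons (d w : String) (c : Char) (r : List Char) :
    validU d w (c :: r) = (if chS c = d then validF d w r else validU d w r) := by
  rw [validU]
  by_cases h1 : chS c = d
  · have e1 : (chS c == d) = true := by simp [h1]
    have e1' : (chS c != d) = false := by simp [h1]
    rw [e1, e1', if_pos h1]; simp
  · have e1 : (chS c == d) = false := by simp [h1]
    have e1' : (chS c != d) = true := by simp [h1]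
    rw [e1, e1', if_neg h1]; simp

-- lines whose stripped content ends exactly at the closing text_wrap of a quoted field
mutual
def endsF (d w : String) : List Char → Bool
  | [] => false
  | c :: r => if chS c = d then endsF d w r else if chS c = w then endsQq d w r else endsU d w r
def endsQq (d w : String) : List Char → Bool
  | [] => false
  | c :: r => if chS c = w then endsAfter d w r else endsQq d w r
def endsAfter (d w : String) : List Char → Bool
  | [] => true
  | c :: r => if chS c = d then endsF d w r else false
def endsU (d w : String) : List Char → Bool
  | [] => false
  | c :: r => if chS c = d then endsF d w r else endsU d w r
end


-- the compact input-shape scanner of D_ agrees with the grammar-style ends* clauses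
theorem lastQuoted_ends (d w : String) : ∀ (L : List Char),
    lastQuoted d w L 0 = endsF d w L ∧ lastQuoted d w L 1 = endsQq d w L ∧
    lastQuoted d w L 2 = endsAfter d w L ∧ lastQuoted d w L 3 = endsU d w L ∧
    lastQuoted d w L 4 = false := by
  intro L
  induction L with
  | nil => exact ⟨rfl, rfl, rfl, rfl, rfl⟩
  | cons c r ih =>
    obtain ⟨ihF, ihQ, ihE, ihU, ihD⟩ := ih
    refine ⟨?_, ?_, ?_, ?_, ?_⟩
    · rw [lastQuoted, endsF]
      norm_num
      by_cases hcd : chS c = d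
      · rw [if_pos hcd, if_pos hcd]; exact ihF
      · rw [if_neg hcd, if_neg hcd]
        by_cases hcw : chS c = w
        · rw [if_pos hcw, if_pos hcw]; exact ihQ
        · rw [if_neg hcw, if_neg hcw]; exact ihU
    · rw [lastQuoted, endsQq]
      norm_num
      by_cases hcw : chS c = w
      · rw [if_pos hcw, if_pos hcw]; exact ihE
      · rw [if_neg hcw, if_neg hcw]; exact ihQ
    · rw [lastQuoted, endsAfter]
      norm_num
      by_cases hcd : chS c = d
      · simp [hcd, ihF]
      · simp [hcd, ihD]
    · rw [lastQuoted, endsU]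
      norm_num
      by_cases hcd : chS c = d
      · rw [if_pos hcd, if_pos hcd]; exact ihF
      · rw [if_neg hcd, if_neg hcd]; exact ihU
    · rw [lastQuoted]
      norm_num
      exact ihD

theorem spanQuote_snd_len (w : String) : ∀ (l : List Char) s r', spanQuote w l = some (s, r') → r'.length < l.length := by
  intro l
  induction l with
  | nil => intro s r' h; simp [spanQuote] at h
  | cons c r ih =>
    intro s r' h
    by_cases hc : chS c = w
    · simp [spanQuote, hc] at h
      obtain ⟨-, rfl⟩ := h
      simp
    · rw [spanQuote, if_neg hc] at h
      obtain ⟨⟨s1, r1⟩, h1, h2⟩ := Option.map_eq_some_iff.mp h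
      injection h2 with h2a h2b
      subst h2b
      have := ih s1 r1 h1
      simp; omega

theorem spanField_snd_len (d : String) : ∀ (l : List Char), (spanField d l).2.length ≤ l.length := by
  intro l
  induction l with
  | nil => simp [spanField]
  | cons c r ih =>
    by_cases hc : chS c = d
    · simp [spanField, hc]
    · simp [spanField, hc]; omega

-- the fuel argument of altFieldsF is irrelevant as long as it bounds the length
theorem altFieldsF_irrel (d w : String) : ∀ (n : ℕ) (l : List Char), l.length ≤ n → ∀ (m : ℕ), l.length ≤ m →
    altFieldsF d w n l = altFieldsF d w m l := by
  intro n
  induction n with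
  | zero =>
    intro l hl m hm
    rcases l with _ | ⟨c, r⟩
    · cases m <;> rfl
    · simp at hl
  | succ n ih =>
    intro l hl m hm
    rcases l with _ | ⟨c, rest⟩
    · cases m <;> rfl
    · rcases m with _ | m
      · simp at hm
      · simp only [altFieldsF]
        have hrest : rest.length ≤ n := by simp at hl; omega
        have hrestm : rest.length ≤ m := by simp at hm; omega
        by_cases hcd : chS c = d
        · rw [if_pos hcd, if_pos hcd, ih rest hrest m hrestm]
        · rw [if_neg hcd, if_neg hcd]
          by_cases hcw : chS c = w
          · rw [if_pos hcw, if_pos hcw]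
            rcases hq : spanQuote w rest with _ | ⟨s, r'⟩
            · rfl
            · rcases r' with _ | ⟨c2, r''⟩
              · rfl
              · have hr'' : r''.length ≤ n := by
                  have := spanQuote_snd_len w rest s (c2 :: r'') hq
                  simp at this; omega
                have hr''m : r''.length ≤ m := by
                  have := spanQuote_snd_len w rest s (c2 :: r'') hq
                  simp at this; omega
                simp only [ih r'' hr'' m hr''m]
          · rw [if_neg hcw, if_neg hcw]
            rcases hf : spanField d rest with ⟨s, r1⟩
            rcases r1 with _ | ⟨c2, r''⟩
            · rfl
            · have hlen := spanField_snd_len d rest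
              rw [hf] at hlen
              simp at hlen
              have hr'' : r''.length ≤ n := by omega
              have hr''m : r''.length ≤ m := by omega
              simp only [ih r'' hr'' m hr''m]

-- one-step equations of altFields
theorem altFields_delim (d w : String) (c : Char) (rest : List Char) (hcd : chS c = d) :
    altFields d w (c :: rest) = (altFields d w rest).map (fun bl => none :: bl) := by
  unfold altFields
  simp only [List.length_cons, altFieldsF, if_pos hcd]

theorem altFields_q_end (d w : String) (c : Char) (rest s : List Char)
    (hcd : ¬ chS c = d) (hcw : chS c = w) (hq : spanQuote w rest = some (s, [])) :
    altFields d w (c :: rest) = some [some (String.mk s)] := by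
  unfold altFields
  simp only [List.length_cons, altFieldsF, if_neg hcd, if_pos hcw, hq]

theorem altFields_q_more (d w : String) (c c2 : Char) (rest s r'' : List Char)
    (hcd : ¬ chS c = d) (hcw : chS c = w) (hq : spanQuote w rest = some (s, c2 :: r''))
    (hc2 : chS c2 = d) :
    altFields d w (c :: rest) = (altFields d w r'').map (fun bl => some (String.mk s) :: bl) := by
  unfold altFields
  simp only [List.length_cons, altFieldsF, if_neg hcd, if_pos hcw, hq, if_pos hc2]
  have hlt := spanQuote_snd_len w rest s (c2 :: r'') hq
  simp at hlt
  rw [altFieldsF_irrel d w rest.length r'' (by omega) r''.length le_rfl]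

theorem altFields_u_end (d w : String) (c : Char) (rest s1 : List Char)
    (hcd : ¬ chS c = d) (hcw : ¬ chS c = w) (hf : spanField d rest = (s1, [])) :
    altFields d w (c :: rest) = some [some (String.mk (c :: s1))] := by
  unfold altFields
  simp only [List.length_cons, altFieldsF, if_neg hcd, if_neg hcw, hf]

theorem altFields_u_more (d w : String) (c : Char) (rest s1 r'' : List Char) (c2 : Char)
    (hcd : ¬ chS c = d) (hcw : ¬ chS c = w) (hf : spanField d rest = (s1, c2 :: r'')) :
    altFields d w (c :: rest) = (altFields d w r'').map (fun bl => some (String.mk (c :: s1)) :: bl) := by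
  unfold altFields
  simp only [List.length_cons, altFieldsF, if_neg hcd, if_neg hcw, hf]
  have hlen := spanField_snd_len d rest
  rw [hf] at hlen
  simp at hlen
  rw [altFieldsF_irrel d w rest.length r'' (by omega) r''.length le_rfl]

-- A's end-of-loop return value as a function of the final FSA configuration
def AfinL (st : Int) (f : Option (List Char)) (ln : List (Option String)) : List (Option String) :=
  if st = 0 then ln else if st = 2 ∨ st = 3 then ln ++ [some (String.mk (f.getD []))] else []

theorem AfinL_cons (st : Int) (f : Option (List Char)) (x : Option String) (ln : List (Option String))
    (h : st = 0 ∨ st = 2 ∨ st = 3) : AfinL st f (x :: ln) = x :: AfinL st f ln := by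
  rcases h with rfl | rfl | rfl <;> norm_num [AfinL]

theorem getLastD_of_ne_nil {α : Type} (l : List α) (a b : α) (h : l ≠ []) :
    l.getLastD a = l.getLastD b := by
  obtain ⟨y, hy⟩ := Option.isSome_iff_exists.mp (List.getLast?_isSome.mpr h)
  simp [List.getLastD_eq_getLast?, hy]

theorem altFields_ne_nil (d w : String) (c : Char) (rest : List Char) (bl : List (Option String))
    (h : altFields d w (c :: rest) = some bl) : bl ≠ [] := by
  by_cases hcd : chS c = d
  · rw [altFields_delim d w c rest hcd] at h
    obtain ⟨bl', -, rfl⟩ := Option.map_eq_some_iff.mp h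
    simp
  · by_cases hcw : chS c = w
    · rcases hq : spanQuote w rest with _ | ⟨s, r'⟩
      · unfold altFields at h
        simp only [List.length_cons, altFieldsF, if_neg hcd, if_pos hcw, hq] at h
        cases h
      · rcases r' with _ | ⟨c2, r''⟩
        · rw [altFields_q_end d w c rest s hcd hcw hq] at h
          injection h with h; subst h; simp
        · by_cases hc2 : chS c2 = d
          · rw [altFields_q_more d w c c2 rest s r'' hcd hcw hq hc2] at h
            obtain ⟨bl', -, rfl⟩ := Option.map_eq_some_iff.mp h
            simp
          · unfold altFields at h
            simp only [List.length_cons, altFieldsF, if_neg hcd, if_pos hcw, hq, if_neg hc2] at h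
            cases h
    · rcases hf : spanField d rest with ⟨s1, r1⟩
      rcases r1 with _ | ⟨c2, r''⟩
      · rw [altFields_u_end d w c rest s1 hcd hcw hf] at h
        injection h with h; subst h; simp
      · rw [altFields_u_more d w c rest s1 r'' c2 hcd hcw hf] at h
        obtain ⟨bl', -, rfl⟩ := Option.map_eq_some_iff.mp h
        simp

-- pulling the accumulator out of the FSA loop
theorem fsa_acc (d w : String) : ∀ (l : List Char) (st : Int) (f : Option (List Char)) (acc : List (Option String)),
    fsa d w l st f acc = (fsa d w l st f []).map (fun r => (r.1, r.2.1, acc ++ r.2.2)) := by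
  intro l
  induction l with
  | nil => intro st f acc; simp [fsa]
  | cons c rest ih =>
    intro st f acc
    simp only [fsa, List.nil_append]
    split_ifs
    · rw [ih, ih _ _ ([none])]
      cases fsa d w rest 0 f [] <;> simp
    · exact ih _ _ _
    · exact ih _ _ _
    · rw [ih, ih _ _ ([some (String.mk (f.getD []))])]
      cases fsa d w rest 2 f [] <;> simp
    · exact ih _ _ _
    · exact ih _ _ _
    · rfl
    · rw [ih, ih _ _ ([some (String.mk (f.getD []))])]
      cases fsa d w rest 0 f [] <;> simp
    · exact ih _ _ _
    · rfl

-- the FSA in state 1 consumes exactly a quoted span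
theorem fsa_state1 (d w : String) : ∀ (l : List Char) (s r' : List Char) (f0 : List Char) (acc : List (Option String)),
    spanQuote w l = some (s, r') →
    fsa d w l 1 (some f0) acc = fsa d w r' 2 (some (f0 ++ s)) (acc ++ [some (String.mk (f0 ++ s))]) := by
  intro l
  induction l with
  | nil => intro s r' f0 acc h; simp [spanQuote] at h
  | cons c rest ih =>
    intro s r' f0 acc h
    by_cases hc : chS c = w
    · simp [spanQuote, hc] at h
      obtain ⟨rfl, rfl⟩ := h
      simp [fsa, hc]
    · rw [spanQuote, if_neg hc] at h
      obtain ⟨⟨s1, r1⟩, h1, h2⟩ := Option.map_eq_some_iff.mp h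
      injection h2 with h2a h2b
      subst h2a; subst h2b
      have hstep : fsa d w (c :: rest) 1 (some f0) acc = fsa d w rest 1 (some (f0 ++ [c])) acc := by
        simp [fsa, hc]
      rw [hstep, ih _ _ _ _ h1]
      simp

-- the FSA in state 3 consumes exactly an unquoted span
theorem fsa_state3 (d w : String) : ∀ (l : List Char) (f0 : List Char) (acc : List (Option String)),
    fsa d w l 3 (some f0) acc =
      (match spanField d l with
       | (s, []) => some (3, some (f0 ++ s), acc)
       | (s, _ :: r'') => fsa d w r'' 0 (some (f0 ++ s)) (acc ++ [some (String.mk (f0 ++ s))])) := by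
  intro l
  induction l with
  | nil => intro f0 acc; simp [fsa, spanField]
  | cons c rest ih =>
    intro f0 acc
    by_cases hc : chS c = d
    · simp [fsa, hc, spanField]
    · have hstep : fsa d w (c :: rest) 3 (some f0) acc = fsa d w rest 3 (some (f0 ++ [c])) acc := by
        simp [fsa, hc]
      rw [hstep, ih]
      rcases hf : spanField d rest with ⟨s1, r1⟩
      rcases r1 with _ | ⟨c2, r''⟩ <;> simp [spanField, hc, hf]

-- the validity grammar in quoted position finds a matching close
theorem validQ_span (d w : String) : ∀ (l : List Char), validQ d w l = true →
    ∃ s r', spanQuote w l = some (s, r') ∧ validEnd d w r' = true ∧ endsQq d w l = endsAfter d w r' := by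
  intro l
  induction l with
  | nil => intro h; simp [validQ] at h
  | cons c rest ih =>
    intro h
    by_cases hc : chS c = w
    · refine ⟨[], rest, by simp [spanQuote, hc], ?_, by simp [endsQq, hc]⟩
      rw [validQ_cons] at h; simpa [hc] using h
    · rw [validQ_cons] at h
      simp only [hc, if_false] at h
      obtain ⟨s, r', h1, h2, h3⟩ := ih h
      exact ⟨c :: s, r', by simp [spanQuote, hc, h1], h2, by rw [endsQq]; simpa [hc] using h3⟩

-- the validity grammar in unquoted position and spanField agree on the rest of the line
theorem validU_span (d w : String) : ∀ (l : List Char), validU d w l = true →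
    ((spanField d l).2 = [] ∧ endsU d w l = false) ∨
    (∃ c2 r'', (spanField d l).2 = c2 :: r'' ∧ validF d w r'' = true ∧ endsU d w l = endsF d w r'') := by
  intro l
  induction l with
  | nil => intro _; left; simp [spanField, endsU]
  | cons c rest ih =>
    intro h
    by_cases hc : chS c = d
    · right
      refine ⟨c, rest, by simp [spanField, hc], ?_, by simp [endsU, hc]⟩
      rw [validU_cons] at h; simpa [hc] using h
    · rw [validU_cons] at h
      simp only [hc, if_false] at h
      rcases ih h with ⟨h1, h2⟩ | ⟨c2, r'', h1, h2, h3⟩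
      · left; constructor
        · simp [spanField, hc, h1]
        · rw [endsU]; simpa [hc] using h2
      · right
        exact ⟨c2, r'', by simp [spanField, hc, h1], h2, by rw [endsU]; simpa [hc] using h3⟩

theorem consRHS (x : Option String) (bl : List (Option String)) (e : Bool)
    (hx : e = true → x = none ∨ bl ≠ []) :
    (if e = true then (x :: bl) ++ [(x :: bl).getLastD none] else x :: bl) =
      x :: (if e = true then bl ++ [bl.getLastD none] else bl) := by
  cases e with
  | false => simp
  | true =>
    rcases hx rfl with rfl | hbl
    · show (none :: bl) ++ [(none :: bl).getLastD none] = none :: (bl ++ [bl.getLastD none])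
      rw [List.getLastD_cons]
      rfl
    · show (x :: bl) ++ [(x :: bl).getLastD none] = x :: (bl ++ [bl.getLastD none])
      rw [List.getLastD_cons, getLastD_of_ne_nil bl x none hbl]
      rfl

-- one-step equations of the FSA in states 0 and 2
theorem fsa0_cons (d w : String) (c : Char) (rest : List Char) (f : Option (List Char)) (line : List (Option String)) :
    fsa d w (c :: rest) 0 f line =
      if chS c = d then fsa d w rest 0 f (line ++ [none])
      else if chS c = w then fsa d w rest 1 (some []) line
      else fsa d w rest 3 (some [c]) line := rfl

theorem fsa2_cons (d w : String) (c : Char) (rest : List Char) (f : Option (List Char)) (line : List (Option String)) :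
    fsa d w (c :: rest) 2 f line = if chS c = d then fsa d w rest 0 f line else none := rfl

-- MAIN LEMMA: on grammar-valid input the FSA from state 0 returns B's field list,
-- with the last field duplicated exactly when the line ends at a closing text_wrap
theorem fsa_main (d w : String) : ∀ (n : ℕ) (l : List Char), l.length ≤ n → ∀ (f : Option (List Char)),
    validF d w l = true →
    ∃ st fl ln bl, fsa d w l 0 f [] = some (st, fl, ln) ∧ (st = 0 ∨ st = 2 ∨ st = 3) ∧
      altFields d w l = some bl ∧
      AfinL st fl ln = (if endsF d w l = true then bl ++ [bl.getLastD none] else bl) := by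
  intro n
  induction n with
  | zero =>
    intro l hl f _
    rcases l with _ | ⟨c, r⟩
    · exact ⟨0, f, [], [], by simp [fsa], Or.inl rfl, rfl, by simp [AfinL, endsF]⟩
    · simp at hl
  | succ n ih =>
    intro l hl f hv
    rcases l with _ | ⟨c, rest⟩
    · exact ⟨0, f, [], [], by simp [fsa], Or.inl rfl, rfl, by simp [AfinL, endsF]⟩
    have hrest : rest.length ≤ n := by simp at hl; omega
    by_cases hcd : chS c = d
    · -- field boundary is a delimiter: A appends None, B conses none
      rw [validF_cons, if_pos hcd] at hv
      obtain ⟨st, fl, ln, bl, h1, h2, h3, h4⟩ := ih rest hrest f hv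
      have hA : fsa d w (c :: rest) 0 f [] = some (st, fl, none :: ln) := by
        rw [fsa0_cons, if_pos hcd, List.nil_append, fsa_acc, h1]; rfl
      refine ⟨st, fl, none :: ln, none :: bl, hA, h2, ?_, ?_⟩
      · rw [altFields_delim d w c rest hcd]; rw [h3]; rfl
      · rw [AfinL_cons _ _ _ _ h2, h4]
        have hE : endsF d w (c :: rest) = endsF d w rest := by rw [endsF, if_pos hcd]
        rw [hE]
        exact (consRHS none bl _ (fun _ => Or.inl rfl)).symm
    · by_cases hcw : chS c = w
      · -- quoted field
        rw [validF_cons, if_neg hcd, if_pos hcw] at hv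
        obtain ⟨s, r', hq, hve, hee⟩ := validQ_span d w rest hv
        have hE : endsF d w (c :: rest) = endsAfter d w r' := by
          rw [endsF, if_neg hcd, if_pos hcw, hee]
        have hA0 : fsa d w (c :: rest) 0 f [] = fsa d w r' 2 (some s) [some (String.mk s)] := by
          rw [fsa0_cons, if_neg hcd, if_pos hcw, fsa_state1 d w rest s r' [] [] hq]; simp
        rcases r' with _ | ⟨c2, r''⟩
        · -- the line ends at the closing quote: the D_ case
          refine ⟨2, some s, [some (String.mk s)], [some (String.mk s)], by rw [hA0]; simp [fsa], by norm_num, ?_, ?_⟩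
          · exact altFields_q_end d w c rest s hcd hcw hq
          · rw [hE]; norm_num [AfinL, endsAfter]
        · rw [validEnd_cons] at hve
          by_cases hc2 : chS c2 = d
          · simp only [hc2, if_true] at hve
            have hr'' : r''.length ≤ n := by
              have := spanQuote_snd_len w rest s (c2 :: r'') hq
              simp at this; omega
            obtain ⟨st, fl, ln, bl, h1, h2, h3, h4⟩ := ih r'' hr'' (some s) hve
            have hA : fsa d w (c :: rest) 0 f [] = some (st, fl, some (String.mk s) :: ln) := by
              rw [hA0, fsa2_cons, if_pos hc2, fsa_acc, h1]; rfl
            have hbl : endsF d w r'' = true → bl ≠ [] := by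
              intro he
              rcases r'' with _ | ⟨c3, r3⟩
              · rw [endsF] at he; simp at he
              · exact altFields_ne_nil d w c3 r3 bl h3
            refine ⟨st, fl, some (String.mk s) :: ln, some (String.mk s) :: bl, hA, h2, ?_, ?_⟩
            · rw [altFields_q_more d w c c2 rest s r'' hcd hcw hq hc2, h3]; rfl
            · rw [AfinL_cons _ _ _ _ h2, h4, hE]
              have hEA : endsAfter d w (c2 :: r'') = endsF d w r'' := by
                rw [endsAfter]; simp [hc2]
              rw [hEA]
              exact (consRHS _ bl _ (fun he => Or.inr (hbl he))).symm
          · simp [hc2] at hve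
      · -- unquoted field
        rw [validF_cons, if_neg hcd, if_neg hcw] at hv
        have hE : endsF d w (c :: rest) = endsU d w rest := by rw [endsF, if_neg hcd, if_neg hcw]
        have hA0 : fsa d w (c :: rest) 0 f [] =
            (match spanField d rest with
             | (s, []) => some (3, some ([c] ++ s), [])
             | (s, _ :: r'') => fsa d w r'' 0 (some ([c] ++ s)) ([] ++ [some (String.mk ([c] ++ s))])) := by
          rw [fsa0_cons, if_neg hcd, if_neg hcw, fsa_state3]
        rcases validU_span d w rest hv with ⟨h1, h2⟩ | ⟨c2, r'', h1, h2, h3⟩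
        · -- no further delimiter: single unquoted field to end of line
          rcases hf : spanField d rest with ⟨s1, r1⟩
          rw [hf] at h1; simp at h1; subst h1
          refine ⟨3, some (c :: s1), [], [some (String.mk (c :: s1))], ?_, by norm_num, ?_, ?_⟩
          · rw [hA0, hf]; simp
          · exact altFields_u_end d w c rest s1 hcd hcw hf
          · rw [hE, h2]; norm_num [AfinL]
        · rcases hf : spanField d rest with ⟨s1, r1⟩
          rw [hf] at h1; simp at h1; subst h1
          have hr'' : r''.length ≤ n := by
            have := spanField_snd_len d rest
            rw [hf] at this; simp at this; omega
          obtain ⟨st, fl, ln, bl, hh1, hh2, hh3, hh4⟩ := ih r'' hr'' (some (c :: s1)) h2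
          have hA : fsa d w (c :: rest) 0 f [] = some (st, fl, some (String.mk (c :: s1)) :: ln) := by
            rw [hA0, hf]
            simp only []
            have heq : fsa d w r'' 0 (some ([c] ++ s1)) ([] ++ [some (String.mk ([c] ++ s1))]) =
                (fsa d w r'' 0 (some (c :: s1)) []).map
                  (fun r => (r.1, r.2.1, [some (String.mk (c :: s1))] ++ r.2.2)) := by
              rw [fsa_acc]
              rfl
            rw [heq, hh1]; rfl
          have hbl : endsF d w r'' = true → bl ≠ [] := by
            intro he
            rcases r'' with _ | ⟨c3, r3⟩
            · rw [endsF] at he; simp at he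
            · exact altFields_ne_nil d w c3 r3 bl hh3
          refine ⟨st, fl, some (String.mk (c :: s1)) :: ln, some (String.mk (c :: s1)) :: bl, hA, hh2, ?_, ?_⟩
          · rw [altFields_u_more d w c rest s1 r'' c2 hcd hcw hf, hh3]; rfl
          · rw [AfinL_cons _ _ _ _ hh2, hh4, hE, h3]
            exact (consRHS _ bl _ (fun he => Or.inr (hbl he))).symm

-- A's end-of-loop if-chain equals AfinL on non-raising final states
theorem Achain_eq (d w : String) (lin : String) (st : Int) (f : Option (List Char)) (ln : List (Option String))
    (hne : d ≠ w) (hfsa : fsa d w (stripEol lin.toList) 0 none [] = some (st, f, ln))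
    (hst : st = 0 ∨ st = 2 ∨ st = 3) :
    split_sv_line lin d w = AfinL st f ln := by
  unfold split_sv_line
  rw [if_neg hne, hfsa]
  rcases hst with rfl | rfl | rfl <;> norm_num [AfinL]

-- ===== VERDICT (by name: the statement is the Claim_ definition above) =====
theorem split_sv_line_spec : Claim_unchanged_split_sv_line := by
  intro lin d w _ hpre
  obtain ⟨hne, -, hval⟩ := hpre
  intro hnd
  unfold D_split_sv_line at hnd
  have hnd' : endsF d w (pvContent lin) = false := by
    rw [← (lastQuoted_ends d w (pvContent lin)).1]
    cases hv2 : lastQuoted d w (pvContent lin) 0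
    · rfl
    · exact absurd hv2 hnd
  rw [← stripEol_eq_pvContent lin] at hnd' hval
  obtain ⟨st, fl, ln, bl, h1, h2, h3, h4⟩ :=
    fsa_main d w (stripEol lin.toList).length (stripEol lin.toList) le_rfl none hval
  rw [Achain_eq d w lin st fl ln hne h1 h2, h4]
  unfold split_sv_line_alt
  rw [if_neg hne, h3, hnd']
  simp

theorem split_sv_line_changed : Claim_changed_split_sv_line := by
  unfold Claim_changed_split_sv_line; decide

theorem split_sv_line_tight : Claim_exact_split_sv_line := by
  intro lin d w _ hpre hd
  obtain ⟨hne, -, hval⟩ := hpre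
  unfold D_split_sv_line at hd
  have hd' : endsF d w (pvContent lin) = true := by
    rw [← (lastQuoted_ends d w (pvContent lin)).1]
    exact hd
  rw [← stripEol_eq_pvContent lin] at hd' hval
  obtain ⟨st, fl, ln, bl, h1, h2, h3, h4⟩ :=
    fsa_main d w (stripEol lin.toList).length (stripEol lin.toList) le_rfl none hval
  rw [Achain_eq d w lin st fl ln hne h1 h2, h4, hd']
  rw [if_pos rfl]
  unfold split_sv_line_alt
  rw [if_neg hne, h3]
  intro heq
  have := congrArg List.length heq
  simp at this
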